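-- pv_equiv track=rewrite | github.com/ntthai2/ouro_solve | board_generator.py | blue_cells
-- ===== SOURCE A (Python) =====
-- from typing import List, Tuple
--
-- GRID_SIZE   = 5
--
-- NUM_CELLS   = 25
--
-- def rc(cell: int) -> Tuple[int, int]:
--     return cell // GRID_SIZE, cell % GRID_SIZE
--
-- def blue_cells(red_idx: int, occupied: set) -> List[int]:
--     """
--     Cells sharing nothing with red (not same row, col, or diagonal),
--     excluding occupied cells.
--     """
--     r, c = rc(red_idx)
--     result = []
--     for idx in range(NUM_CELLS):
--         if idx in occupied:
--             continue
--         ir, ic = rc(idx)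
--         if ir != r and ic != c and abs(ir - r) != abs(ic - c):
--             result.append(idx)
--     return result
-- ===== SOURCE B (Python) =====
-- from typing import List
--
-- GRID_SIZE = 5
-- NUM_CELLS = 25
--
-- def blue_cells(red_idx: int, occupied: set) -> List[int]:
--     # Precompute the set of cells excluded by red: its row, its column,
--     # and both diagonals through (r, c); then list the free cells.
--     r, c = red_idx // GRID_SIZE, red_idx % GRID_SIZE
--     forbidden = set()
--     if 0 <= r < GRID_SIZE:
--         for cc in range(GRID_SIZE):
--             forbidden.add(r * GRID_SIZE + cc)
--     for rr in range(GRID_SIZE):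
--         forbidden.add(rr * GRID_SIZE + c)
--     for ic in range(GRID_SIZE):
--         for ir in (r + (ic - c), r - (ic - c)):
--             if 0 <= ir < GRID_SIZE:
--                 forbidden.add(ir * GRID_SIZE + ic)
--     return [idx for idx in range(NUM_CELLS)
--             if idx not in occupied and idx not in forbidden]
-- ===== Notes on version B (the rewrite author's own statement) =====
-- stated objective: alternative
-- what changed: B precomputes a 'forbidden' set by walking red's row, column and both diagonals, then lists unoccupied cells absent from it, instead of A's per-cell arithmetic row/col/diagonal test.
import Mathlib
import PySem

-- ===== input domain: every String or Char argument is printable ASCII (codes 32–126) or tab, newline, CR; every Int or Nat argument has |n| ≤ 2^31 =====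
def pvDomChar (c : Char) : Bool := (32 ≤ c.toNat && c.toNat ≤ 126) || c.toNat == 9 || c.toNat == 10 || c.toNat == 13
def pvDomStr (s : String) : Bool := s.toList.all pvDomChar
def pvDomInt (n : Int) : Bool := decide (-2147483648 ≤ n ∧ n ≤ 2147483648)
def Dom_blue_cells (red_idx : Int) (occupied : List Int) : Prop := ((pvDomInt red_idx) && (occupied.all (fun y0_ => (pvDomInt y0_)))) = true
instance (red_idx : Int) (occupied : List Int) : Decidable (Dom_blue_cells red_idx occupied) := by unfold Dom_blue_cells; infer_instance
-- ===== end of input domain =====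

-- B precomputes the cells excluded by red (row, column, diagonals) as a set, then lists
-- the unoccupied non-excluded cells: a data-structure restructuring (same cost), not a speedup.

-- ===== PORT A =====
def rc (cell : Int) : Int × Int := (PySem.Int.floordiv cell 5, PySem.Int.mod cell 5)

def blue_cells (red_idx : Int) (occupied : List Int) : List Int :=
  let r := (rc red_idx).1
  let c := (rc red_idx).2
  (PySem.List.pyRange 0 25 1).foldl (fun result idx =>
    if idx ∈ occupied then result
    else
      let ir := (rc idx).1
      let ic := (rc idx).2
      if ir ≠ r ∧ ic ≠ c ∧ (ir - r).natAbs ≠ (ic - c).natAbs then result ++ [idx]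
      else result) []

-- ===== PORT B =====
-- Source B's `forbidden` set, built in the same three walks.
def forbiddenSet (r c : Int) : PySem.Set Int :=
  let f0 : PySem.Set Int :=
    if 0 ≤ r ∧ r < 5 then
      (PySem.List.pyRange 0 5 1).foldl (fun s cc => PySem.Set.add s (r * 5 + cc)) PySem.Set.empty
    else PySem.Set.empty
  let f1 := (PySem.List.pyRange 0 5 1).foldl (fun s rr => PySem.Set.add s (rr * 5 + c)) f0
  (PySem.List.pyRange 0 5 1).foldl (fun s ic =>
    [r + (ic - c), r - (ic - c)].foldl (fun s' ir =>
      if 0 ≤ ir ∧ ir < 5 then PySem.Set.add s' (ir * 5 + ic) else s') s) f1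

def blue_cells_alt (red_idx : Int) (occupied : List Int) : List Int :=
  let r := PySem.Int.floordiv red_idx 5
  let c := PySem.Int.mod red_idx 5
  let forbidden := forbiddenSet r c
  (PySem.List.pyRange 0 25 1).foldl (fun res idx =>
    if idx ∉ occupied ∧ ¬ PySem.Set.contains forbidden idx then res ++ [idx] else res) []

-- ===== PRECONDITION & SPEC =====
def Spec_blue_cells (red_idx : Int) (occupied : List Int) (out : List Int) : Prop := out = blue_cells_alt red_idx occupied
instance (red_idx : Int) (occupied : List Int) (out : List Int) : Decidable (Spec_blue_cells red_idx occupied out) := by unfold Spec_blue_cells; infer_instance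

-- ===== CLAIM (what is proved, stated in full; the proofs are below) =====
def Claim_equal_blue_cells : Prop := ∀ (red_idx : Int) (occupied : List Int), Dom_blue_cells red_idx occupied → Spec_blue_cells red_idx occupied (blue_cells red_idx occupied)

-- ===== LEMMAS AND PROOFS =====

-- membership in a fold of conditional Set.add steps
lemma mem_foldl_of_step (g : PySem.Set Int → Int → PySem.Set Int) (Q : Int → Int → Prop)
    (hg : ∀ s a x, x ∈ g s a ↔ x ∈ s ∨ Q a x) (l : List Int) (s : PySem.Set Int) (x : Int) :
    x ∈ l.foldl g s ↔ x ∈ s ∨ ∃ a ∈ l, Q a x := by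
  induction l generalizing s with
  | nil => simp
  | cons y ys ih =>
    simp only [List.foldl, ih, hg]
    constructor
    · rintro (⟨h | h⟩ | ⟨a, ha, h⟩)
      · exact Or.inl h
      · exact Or.inr ⟨y, List.mem_cons_self, h⟩
      · exact Or.inr ⟨a, List.mem_cons_of_mem _ ha, h⟩
    · rintro (h | ⟨a, ha, h⟩)
      · exact Or.inl (Or.inl h)
      · rcases List.mem_cons.mp ha with rfl | ha
        · exact Or.inl (Or.inr h)
        · exact Or.inr ⟨a, ha, h⟩

-- membership in Source B's forbidden set = A's arithmetic exclusion test, for cells 0..24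
lemma mem_forbiddenSet (r c idx : Int) (hc0 : 0 ≤ c) (hc5 : c < 5)
    (hi0 : 0 ≤ idx) (hi5 : idx < 25) :
    PySem.Set.contains (forbiddenSet r c) idx = true ↔
      ¬ (PySem.Int.floordiv idx 5 ≠ r ∧ PySem.Int.mod idx 5 ≠ c ∧
         (PySem.Int.floordiv idx 5 - r).natAbs ≠ (PySem.Int.mod idx 5 - c).natAbs) := by
  have h5 : (0:Int) < 5 := by norm_num
  rw [PySem.Int.floordiv_eq_ediv_of_pos h5, PySem.Int.mod_eq_emod_of_pos h5]
  have hcontains : ∀ (s : PySem.Set Int) (x : Int), PySem.Set.contains s x = true ↔ x ∈ s := by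
    intro s x; simp [PySem.Set.contains]
  rw [hcontains]
  unfold forbiddenSet
  rw [mem_foldl_of_step _
      (fun a x => (0 ≤ r + (a - c) ∧ r + (a - c) < 5 ∧ x = (r + (a - c)) * 5 + a) ∨
                  (0 ≤ r - (a - c) ∧ r - (a - c) < 5 ∧ x = (r - (a - c)) * 5 + a))
      (by intro s a x
          simp only [List.foldl]
          split_ifs <;> first
            | (simp only [PySem.Set.mem_add]; tauto)
            | tauto)]
  rw [mem_foldl_of_step _ (fun a x => x = a * 5 + c)
      (by intro s a x; simp [PySem.Set.mem_add])]
  have hmemrow : ∀ x : Int,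
      (x ∈ (if 0 ≤ r ∧ r < 5 then
        (PySem.List.pyRange 0 5 1).foldl (fun s cc => PySem.Set.add s (r * 5 + cc)) PySem.Set.empty
       else PySem.Set.empty)) ↔ (0 ≤ r ∧ r < 5) ∧ ∃ a ∈ PySem.List.pyRange 0 5 1, x = r * 5 + a := by
    intro x
    split_ifs with h
    · rw [mem_foldl_of_step _ (fun a x => x = r * 5 + a)
        (by intro s a x; simp [PySem.Set.mem_add])]
      simp [PySem.Set.empty, h]
    · simp [PySem.Set.empty, h]
  rw [hmemrow]
  simp only [PySem.List.mem_pyRange_one]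
  constructor
  · rintro ((⟨hr, a, ha, rfl⟩ | ⟨a, ha, rfl⟩) | ⟨a, ha, h⟩) <;> omega
  · intro h
    by_cases hrow : idx / 5 = r
    · exact Or.inl (Or.inl ⟨⟨by omega, by omega⟩, idx % 5, by omega, by omega⟩)
    · by_cases hcol : idx % 5 = c
      · exact Or.inl (Or.inr ⟨idx / 5, by omega, by omega⟩)
      · refine Or.inr ⟨idx % 5, by omega, ?_⟩
        omega

lemma foldl_two_ifs (occ : List Int) (p : Int → Prop) [DecidablePred p]
    (l : List Int) (acc : List Int) :
    l.foldl (fun res idx => if idx ∈ occ then res else if p idx then res ++ [idx] else res) acc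
      = l.foldl (fun res idx => if idx ∉ occ ∧ p idx then res ++ [idx] else res) acc := by
  induction l generalizing acc with
  | nil => rfl
  | cons x xs ih =>
    simp only [List.foldl]
    rw [ih]
    congr 1
    split_ifs <;> simp_all

lemma foldl_filter_congr (p q : Int → Prop) [DecidablePred p] [DecidablePred q]
    (l : List Int) (h : ∀ x ∈ l, p x ↔ q x) (acc : List Int) :
    l.foldl (fun res idx => if p idx then res ++ [idx] else res) acc
      = l.foldl (fun res idx => if q idx then res ++ [idx] else res) acc := by
  induction l generalizing acc with
  | nil => rfl
  | cons x xs ih =>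
    simp only [List.foldl]
    rw [ih (fun y hy => h y (List.mem_cons_of_mem _ hy))]
    congr 1
    have := h x (List.mem_cons_self)
    split_ifs <;> tauto

-- ===== VERDICT (by name: the statement is the Claim_ definition above) =====
theorem blue_cells_spec : Claim_equal_blue_cells := by
  intro red_idx occupied _
  unfold Spec_blue_cells blue_cells blue_cells_alt rc
  simp only []
  rw [foldl_two_ifs]
  apply foldl_filter_congr
  intro x hx
  rw [PySem.List.mem_pyRange_one] at hx
  have hc : 0 ≤ PySem.Int.mod red_idx 5 ∧ PySem.Int.mod red_idx 5 < 5 := by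
    rw [PySem.Int.mod_eq_emod_of_pos (by norm_num)]
    omega
  have hm := mem_forbiddenSet (PySem.Int.floordiv red_idx 5) (PySem.Int.mod red_idx 5)
    x hc.1 hc.2 hx.1 hx.2
  rw [hm]
  tauto
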